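-- pv_equiv track=rewrite | github.com/dr3d/prethinker | ingest_frontend.py | _variables_for_arity
-- ===== SOURCE A (Python) =====
-- def _variables_for_arity(arity: int) -> list[str]:
--     alphabet = "XYZUVWABCDEFGHIJKLMNOPQRST"
--     rows: list[str] = []
--     for idx in range(max(0, int(arity))):
--         if idx < len(alphabet):
--             rows.append(alphabet[idx])
--         else:
--             rows.append(f"V{idx+1}")
--     return rows
-- ===== SOURCE B (Python) =====
-- def _variables_for_arity(arity: int) -> list[str]:
--     alphabet = "XYZUVWABCDEFGHIJKLMNOPQRST"
--     n = max(0, int(arity))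
--     out: list[str] = []
--     # build the list back-to-front: numbered overflow names first (counting n down
--     # to 27), then the letters (counting down through the alphabet), then reverse.
--     while n > len(alphabet):
--         out.append(f"V{n}")
--         n -= 1
--     while n > 0:
--         out.append(alphabet[n - 1])
--         n -= 1
--     out.reverse()
--     return out
-- ===== Notes on version B (the rewrite author's own statement) =====
-- stated objective: alternative
-- what changed: Builds the list back-to-front with a mutable countdown counter: one while loop emits the numbered overflow names while the counter exceeds the alphabet length, a second counts down through the alphabet emitting letters, and a final reverse restores the order - replacing A's single forward loop over range(n) with a per-index branch.
import Mathlib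
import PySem

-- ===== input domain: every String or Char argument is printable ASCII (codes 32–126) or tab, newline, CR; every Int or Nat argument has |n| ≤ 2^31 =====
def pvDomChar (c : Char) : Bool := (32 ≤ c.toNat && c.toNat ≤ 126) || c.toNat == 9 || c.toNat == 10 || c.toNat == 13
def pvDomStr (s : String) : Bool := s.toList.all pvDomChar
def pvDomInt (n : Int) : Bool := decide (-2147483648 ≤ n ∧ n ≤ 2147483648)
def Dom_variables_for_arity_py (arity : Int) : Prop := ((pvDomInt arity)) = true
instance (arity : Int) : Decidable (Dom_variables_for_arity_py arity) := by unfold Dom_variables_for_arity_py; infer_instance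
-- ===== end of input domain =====

-- B builds the list back-to-front (two countdown loops: numbered names, then letters)
-- and reverses once at the end, replacing A's forward loop with a per-index branch; same cost.

-- ===== PORT A =====
-- alphabet[idx] is exact here: the branch guarantees 0 ≤ idx < len(alphabet), so pyGet? is some.
def variables_for_arity_py (arity : Int) : List String :=
  (PySem.List.pyRange 0 (max 0 arity) 1).foldl
    (fun rows idx =>
      if idx < PySem.Str.len "XYZUVWABCDEFGHIJKLMNOPQRST" then
        rows ++ [String.ofList [(PySem.Str.pyGet? "XYZUVWABCDEFGHIJKLMNOPQRST" idx).getD ' ']]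
      else
        rows ++ ["V" ++ PySem.Int.toStr (idx + 1)]) []

-- ===== PORT B =====
-- first while loop: while n > len(alphabet): out.append(f"V{n}"); n -= 1
-- (returns the final n together with out, as the Python loop leaves both)
def pvNumsRev : Nat → List String → Nat × List String
  | n, out =>
    if 26 < n then pvNumsRev (n - 1) (out ++ ["V" ++ PySem.Int.toStr (n : Int)])
    else (n, out)
termination_by n _ => n
decreasing_by omega

-- second while loop: while n > 0: out.append(alphabet[n-1]); n -= 1
-- (alphabet[n-1] is exact: 1 ≤ n here, so pyGet? is some)
def pvLettersRev : Nat → List String → List String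
  | 0, out => out
  | n + 1, out =>
      pvLettersRev n
        (out ++ [String.ofList [(PySem.Str.pyGet? "XYZUVWABCDEFGHIJKLMNOPQRST" (n : Int)).getD ' ']])

def variables_for_arity_py_alt (arity : Int) : List String :=
  let n := (max 0 arity).toNat
  let p := pvNumsRev n []
  (pvLettersRev p.1 p.2).reverse

-- ===== PRECONDITION & SPEC =====
def Spec_variables_for_arity_py (arity : Int) (out : List String) : Prop := out = variables_for_arity_py_alt arity
instance (arity : Int) (out : List String) : Decidable (Spec_variables_for_arity_py arity out) := by unfold Spec_variables_for_arity_py; infer_instance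

-- ===== CLAIM (what is proved, stated in full; the proofs are below) =====
def Claim_equal_variables_for_arity_py : Prop := ∀ (arity : Int), Dom_variables_for_arity_py arity → Spec_variables_for_arity_py arity (variables_for_arity_py arity)

-- ===== LEMMAS AND PROOFS =====

-- A's loop, characterised: letters for the first min(n,26) indices, then V27..Vn.
theorem pv_key (k : Nat) :
    (PySem.List.pyRange 0 (k : Int) 1).map
        (fun idx =>
          if idx < PySem.Str.len "XYZUVWABCDEFGHIJKLMNOPQRST" then
            String.ofList [(PySem.Str.pyGet? "XYZUVWABCDEFGHIJKLMNOPQRST" idx).getD ' ']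
          else "V" ++ PySem.Int.toStr (idx + 1)) =
      ("XYZUVWABCDEFGHIJKLMNOPQRST".toList.take k).map (fun c => String.ofList [c])
        ++ (PySem.List.pyRange 26 (k : Int) 1).map (fun i => "V" ++ PySem.Int.toStr (i + 1)) := by
  induction k with
  | zero => simp [PySem.List.pyRange_one_eq_nil]
  | succ k ih =>
    have hcast : ((k + 1 : Nat) : Int) = (k : Int) + 1 := by push_cast; ring
    rw [hcast, PySem.List.pyRange_one_succ_right (by positivity), List.map_append, ih]
    have hlen26 : PySem.Str.len "XYZUVWABCDEFGHIJKLMNOPQRST" = 26 := by decide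
    have hL : ("XYZUVWABCDEFGHIJKLMNOPQRST".toList).length = 26 := by decide
    by_cases hk : k < 26
    · have hk' : ((k : Int)) < 26 := by exact_mod_cast hk
      have e1 : PySem.List.pyRange 26 ((k : Int)) 1 = [] := PySem.List.pyRange_one_eq_nil (by omega)
      have e2 : PySem.List.pyRange 26 ((k : Int) + 1) 1 = [] := PySem.List.pyRange_one_eq_nil (by omega)
      have hkL : k < ("XYZUVWABCDEFGHIJKLMNOPQRST".toList).length := by omega
      have hget : ("XYZUVWABCDEFGHIJKLMNOPQRST".toList)[k]? =
          some (("XYZUVWABCDEFGHIJKLMNOPQRST".toList)[k]) := List.getElem?_eq_getElem hkL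
      have htake : ("XYZUVWABCDEFGHIJKLMNOPQRST".toList).take (k + 1) =
          ("XYZUVWABCDEFGHIJKLMNOPQRST".toList).take k ++ [("XYZUVWABCDEFGHIJKLMNOPQRST".toList)[k]] := by
        rw [List.take_add_one, hget]; rfl
      have hf : (if ((k : Int)) < PySem.Str.len "XYZUVWABCDEFGHIJKLMNOPQRST" then
            String.ofList [(PySem.Str.pyGet? "XYZUVWABCDEFGHIJKLMNOPQRST" ((k : Int))).getD ' ']
          else "V" ++ PySem.Int.toStr ((k : Int) + 1)) =
          String.ofList [("XYZUVWABCDEFGHIJKLMNOPQRST".toList)[k]] := by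
        rw [if_pos (by rw [hlen26]; exact hk')]
        simp only [PySem.Str.pyGet?_natCast, hget, Option.getD_some]
      rw [e1, e2, htake]
      simp only [List.map_nil, List.append_nil, List.map_append, List.map_cons]
      rw [hf]
    · have hk' : ¬ ((k : Int)) < 26 := by exact_mod_cast hk
      have e2 : PySem.List.pyRange 26 ((k : Int) + 1) 1 =
          PySem.List.pyRange 26 ((k : Int)) 1 ++ [(k : Int)] :=
        PySem.List.pyRange_one_succ_right (by omega)
      have t1 : ("XYZUVWABCDEFGHIJKLMNOPQRST".toList).take k = "XYZUVWABCDEFGHIJKLMNOPQRST".toList :=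
        List.take_of_length_le (by omega)
      have t2 : ("XYZUVWABCDEFGHIJKLMNOPQRST".toList).take (k+1) = "XYZUVWABCDEFGHIJKLMNOPQRST".toList :=
        List.take_of_length_le (by omega)
      rw [t1, t2, e2]
      simp [hk']

-- B's first loop: it stops at min n 26 and has appended V(n), V(n-1), ..., V(27).
theorem pvNumsRev_eq (n : Nat) (out : List String) :
    pvNumsRev n out =
      (min n 26,
        out ++ ((List.range' 27 (n - 26)).map (fun i : Nat => "V" ++ PySem.Int.toStr (i : Int))).reverse) := by
  by_cases h : 26 < n
  · obtain ⟨d, rfl⟩ : ∃ d, n = 26 + (d + 1) := ⟨n - 27, by omega⟩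
    clear h
    induction d generalizing out with
    | zero =>
      rw [pvNumsRev, if_pos (by omega), pvNumsRev, if_neg (by omega)]
      simp
    | succ d ih =>
      rw [pvNumsRev, if_pos (by omega)]
      have : 26 + (d + 1 + 1) - 1 = 26 + (d + 1) := by omega
      rw [this, ih]
      have hr : List.range' 27 (26 + (d + 1 + 1) - 26) =
          List.range' 27 (26 + (d + 1) - 26) ++ [27 + (d + 1)] := by
        have h1 : 26 + (d + 1 + 1) - 26 = (d + 1) + 1 := by omega
        have h2 : 26 + (d + 1) - 26 = d + 1 := by omega
        rw [h1, h2, List.range'_1_concat]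
      rw [hr]
      have hv : ((27 + (d + 1) : Nat) : Int) = ((26 + (d + 1 + 1) : Nat) : Int) := by push_cast; ring
      simp [hv]
  · rw [pvNumsRev, if_neg h]
    have : n - 26 = 0 := by omega
    simp [this, min_eq_left (by omega : n ≤ 26)]

-- B's second loop: for m ≤ 26 it appends the first m letters in reverse order.
theorem pvLettersRev_eq (m : Nat) (hm : m ≤ 26) (out : List String) :
    pvLettersRev m out =
      out ++ (("XYZUVWABCDEFGHIJKLMNOPQRST".toList.take m).map (fun c => String.ofList [c])).reverse := by
  induction m generalizing out with
  | zero => simp [pvLettersRev]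
  | succ m ih =>
    rw [pvLettersRev, ih (by omega)]
    have hL : ("XYZUVWABCDEFGHIJKLMNOPQRST".toList).length = 26 := by decide
    have hmL : m < ("XYZUVWABCDEFGHIJKLMNOPQRST".toList).length := by omega
    have hget : ("XYZUVWABCDEFGHIJKLMNOPQRST".toList)[m]? =
        some (("XYZUVWABCDEFGHIJKLMNOPQRST".toList)[m]) := List.getElem?_eq_getElem hmL
    have htake : ("XYZUVWABCDEFGHIJKLMNOPQRST".toList).take (m + 1) =
        ("XYZUVWABCDEFGHIJKLMNOPQRST".toList).take m ++ [("XYZUVWABCDEFGHIJKLMNOPQRST".toList)[m]] := by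
      rw [List.take_add_one, hget]; rfl
    have hpg : (PySem.Str.pyGet? "XYZUVWABCDEFGHIJKLMNOPQRST" (m : Int)).getD ' ' =
        ("XYZUVWABCDEFGHIJKLMNOPQRST".toList)[m] := by
      simp only [PySem.Str.pyGet?_natCast]
      rw [hget]
      rfl
    rw [htake, List.map_append, hpg]
    simp

-- bridge: A's overflow names over pyRange 26 n equal B's names over range' 27 (n-26).
theorem pv_nums_bridge (n : Nat) :
    (PySem.List.pyRange 26 (n : Int) 1).map (fun i => "V" ++ PySem.Int.toStr (i + 1)) =
      (List.range' 27 (n - 26)).map (fun i : Nat => "V" ++ PySem.Int.toStr (i : Int)) := by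
  induction n with
  | zero => simp [PySem.List.pyRange_one_eq_nil]
  | succ k ih =>
    have hcast : ((k + 1 : Nat) : Int) = (k : Int) + 1 := by push_cast; ring
    by_cases hk : k < 26
    · have e1 : PySem.List.pyRange 26 ((k : Int) + 1) 1 = [] :=
        PySem.List.pyRange_one_eq_nil (by omega)
      have h0 : k + 1 - 26 = 0 := by omega
      rw [hcast, e1, h0]
      simp
    · rw [hcast, PySem.List.pyRange_one_succ_right (by exact_mod_cast Nat.not_lt.mp hk),
        List.map_append, ih]
      have hr : List.range' 27 (k + 1 - 26) = List.range' 27 (k - 26) ++ [27 + (k - 26)] := by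
        have h1 : k + 1 - 26 = (k - 26) + 1 := by omega
        rw [h1, List.range'_1_concat]
      rw [hr, List.map_append]
      have : ((27 + (k - 26) : Nat) : Int) = (k : Int) + 1 := by
        have : 27 + (k - 26) = k + 1 := by omega
        rw [this]; push_cast; ring
      simp [this]

-- ===== VERDICT (by name: the statement is the Claim_ definition above) =====
theorem variables_for_arity_py_spec : Claim_equal_variables_for_arity_py := by
  intro arity _
  unfold Spec_variables_for_arity_py variables_for_arity_py variables_for_arity_py_alt
  have hfun : (fun (rows : List String) (idx : Int) =>
      if idx < PySem.Str.len "XYZUVWABCDEFGHIJKLMNOPQRST" then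
        rows ++ [String.ofList [(PySem.Str.pyGet? "XYZUVWABCDEFGHIJKLMNOPQRST" idx).getD ' ']]
      else rows ++ ["V" ++ PySem.Int.toStr (idx + 1)]) =
      (fun rows idx => rows ++ [if idx < PySem.Str.len "XYZUVWABCDEFGHIJKLMNOPQRST" then
        String.ofList [(PySem.Str.pyGet? "XYZUVWABCDEFGHIJKLMNOPQRST" idx).getD ' ']
      else "V" ++ PySem.Int.toStr (idx + 1)]) := by
    funext rows idx; split <;> rfl
  rw [hfun, PySem.List.foldl_append_singleton_eq_map, List.nil_append]
  obtain ⟨k, hk⟩ : ∃ k : Nat, max 0 arity = (k : Int) :=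
    ⟨(max 0 arity).toNat, (Int.toNat_of_nonneg (le_max_left 0 arity)).symm⟩
  rw [hk, pv_key]
  show _ = (pvLettersRev (pvNumsRev ((k : Int)).toNat []).1 (pvNumsRev ((k : Int)).toNat []).2).reverse
  rw [Int.toNat_natCast, pvNumsRev_eq, pvLettersRev_eq _ (min_le_right _ _), List.nil_append,
    List.reverse_append, List.reverse_reverse, List.reverse_reverse, pv_nums_bridge]
  have htake : ("XYZUVWABCDEFGHIJKLMNOPQRST".toList).take k =
      ("XYZUVWABCDEFGHIJKLMNOPQRST".toList).take (min k 26) := by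
    have hL : ("XYZUVWABCDEFGHIJKLMNOPQRST".toList).length = 26 := by decide
    rcases Nat.le_total k 26 with h | h
    · rw [min_eq_left h]
    · rw [min_eq_right h, List.take_of_length_le (by omega), List.take_of_length_le (by omega)]
  rw [htake]
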